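-- pv_equiv track=rewrite | github.com/saraislamchy/Basic-Python | Basic_day1/GoodSeq.py | goodSeq
-- ===== SOURCE A (Python) =====
-- def goodSeq(N, a):
--     from collections import Counter
--
--     freq = Counter(a)
--     removals = 0
--
--
--     for x in freq:
--         count = freq[x]
--         if count < x:
--             removals += count
--         else:
--             removals += count - x
--
--     return removals
-- ===== SOURCE B (Python) =====
-- def goodSeq(N, a):
--     b = sorted(a)
--     removals = 0
--     cur = None
--     run = 0
--     for x in b:
--         if cur is not None and x == cur:
--             run += 1
--         else:
--             if cur is not None:
--                 removals += run if run < cur else run - cur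
--             cur = x
--             run = 1
--     if cur is not None:
--         removals += run if run < cur else run - cur
--     return removals
-- ===== Notes on version B (the rewrite author's own statement) =====
-- stated objective: alternative
-- what changed: Replaces the Counter hash aggregation with sorting a copy of the list and a single run-length scan over the sorted list, flushing each completed run into the removal count.
import Mathlib
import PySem

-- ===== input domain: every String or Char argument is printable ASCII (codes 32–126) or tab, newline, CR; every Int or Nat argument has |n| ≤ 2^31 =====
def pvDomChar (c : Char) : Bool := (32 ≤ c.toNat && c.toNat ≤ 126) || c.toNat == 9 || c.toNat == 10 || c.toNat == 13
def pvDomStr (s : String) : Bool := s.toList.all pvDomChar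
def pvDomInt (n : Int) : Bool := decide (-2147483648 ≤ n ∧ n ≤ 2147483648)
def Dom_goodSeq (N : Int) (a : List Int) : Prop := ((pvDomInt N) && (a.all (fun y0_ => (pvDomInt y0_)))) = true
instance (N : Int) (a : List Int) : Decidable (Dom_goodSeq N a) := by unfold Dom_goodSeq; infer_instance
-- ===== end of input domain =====

-- B replaces the Counter aggregation with sort-then-run-length scan (alternative decomposition, same results).

-- ===== PORT A =====
-- freq = Counter(a); for x in freq: count = freq[x]; removals += count if count < x else count - x
def goodSeq (N : Int) (a : List Int) : Int :=
  let freq := PySem.Dict.counter a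
  freq.keys.foldl (fun removals x =>
    let count := freq.getD x 0
    if count < x then removals + count else removals + (count - x)) 0

-- ===== PORT B =====
-- loop body of B: state is (cur, run, removals)
def goodSeqStep (st : Option Int × Int × Int) (x : Int) : Option Int × Int × Int :=
  match st with
  | (some c, run, removals) =>
      if x = c then (some c, run + 1, removals)
      else (some x, 1, removals + (if run < c then run else run - c))
  | (none, _, removals) => (some x, 1, removals)

-- final flush after the loop of B
def goodSeqFlush (st : Option Int × Int × Int) : Int :=
  match st with
  | (some c, run, removals) => removals + (if run < c then run else run - c)
  | (none, _, removals) => removals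

def goodSeq_alt (N : Int) (a : List Int) : Int :=
  let b := PySem.List.sorted a (fun x => x) false
  goodSeqFlush (b.foldl goodSeqStep (none, 0, 0))

-- ===== PRECONDITION & SPEC =====
def Spec_goodSeq (N : Int) (a : List Int) (out : Int) : Prop := out = goodSeq_alt N a
instance (N : Int) (a : List Int) (out : Int) : Decidable (Spec_goodSeq N a out) := by unfold Spec_goodSeq; infer_instance

-- ===== CLAIM (what is proved, stated in full; the proofs are below) =====
def Claim_equal_goodSeq : Prop := ∀ (N : Int) (a : List Int), Dom_goodSeq N a → Spec_goodSeq N a (goodSeq N a)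

-- ===== LEMMAS AND PROOFS =====

-- the per-group contribution
def gsF (x c : Int) : Int := if c < x then c else c - x

-- accumulator linearity of the scan
theorem gs_acc (s : List Int) : ∀ (cur : Option Int) (run rem d : Int),
    goodSeqFlush (s.foldl goodSeqStep (cur, run, rem + d)) =
      d + goodSeqFlush (s.foldl goodSeqStep (cur, run, rem)) := by
  induction s with
  | nil =>
    intro cur run rem d
    cases cur <;> simp [goodSeqFlush] <;> ring
  | cons x t ih =>
    intro cur run rem d
    cases cur with
    | none => simpa [goodSeqStep] using ih (some x) 1 rem d
    | some c =>
      by_cases h : x = c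
      · simpa [goodSeqStep, h] using ih (some c) (run + 1) rem d
      · have := ih (some x) 1 (rem + (if run < c then run else run - c)) d
        simp only [List.foldl_cons, goodSeqStep, if_neg h]
        calc goodSeqFlush (t.foldl goodSeqStep
              (some x, 1, rem + d + (if run < c then run else run - c)))
            = goodSeqFlush (t.foldl goodSeqStep
              (some x, 1, rem + (if run < c then run else run - c) + d)) := by ring_nf
          _ = d + goodSeqFlush (t.foldl goodSeqStep
              (some x, 1, rem + (if run < c then run else run - c))) := this

-- scanning a replicate just extends the run
theorem gs_repl (k : ℕ) : ∀ (c run rem : Int),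
    (List.replicate k c).foldl goodSeqStep (some c, run, rem) = (some c, run + k, rem) := by
  induction k with
  | zero => intro c run rem; simp
  | succ n ih =>
    intro c run rem
    simp only [List.replicate_succ, List.foldl_cons, goodSeqStep]
    rw [if_pos trivial, ih]
    simp only [Prod.mk.injEq]
    push_cast
    refine ⟨trivial, by ring, trivial⟩

-- flushing a pending group whose value never reappears
theorem gs_shift (s : List Int) (c run rem : Int) (h : c ∉ s) :
    goodSeqFlush (s.foldl goodSeqStep (some c, run, rem)) =
      (if run < c then run else run - c) + goodSeqFlush (s.foldl goodSeqStep (none, 0, rem)) := by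
  cases s with
  | nil => simp [goodSeqFlush]; ring
  | cons x t =>
    have hx : x ≠ c := fun hxc => h (by simp [hxc])
    have hne : ¬ (x = c) := hx
    simp only [List.foldl_cons, goodSeqStep, if_neg hne]
    exact gs_acc t (some x) 1 rem (if run < c then run else run - c)

-- main characterisation of B's scan on a sorted list
theorem gs_main : ∀ (n : ℕ) (s : List Int), s.length ≤ n → s.Pairwise (· ≤ ·) →
    goodSeqFlush (s.foldl goodSeqStep (none, 0, 0)) =
      ((PySem.List.dedup s).map (fun v => gsF v (s.count v))).sum := by
  intro n
  induction n with
  | zero =>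
    intro s hlen _
    have : s = [] := List.eq_nil_of_length_eq_zero (Nat.le_zero.mp hlen)
    subst this
    simp [goodSeqFlush, PySem.List.dedup]
  | succ n ih =>
    intro s hlen hsort
    cases hs : s with
    | nil => simp [goodSeqFlush, PySem.List.dedup]
    | cons x t =>
      subst hs
      -- decompose into the run of x and the rest
      set p : Int → Bool := fun y => y == x with hp
      have hsplit : (x :: t).takeWhile p ++ (x :: t).dropWhile p = x :: t :=
        List.takeWhile_append_dropWhile
      set tw := (x :: t).takeWhile p with htw
      set dw := (x :: t).dropWhile p with hdw
      have htw_all : ∀ y ∈ tw, y = x := by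
        intro y hy
        simpa [hp] using List.mem_takeWhile_imp hy
      have htw_repl : tw = List.replicate tw.length x :=
        List.eq_replicate_of_mem htw_all
      have htw_cons : ∃ tw', tw = x :: tw' := by
        refine ⟨t.takeWhile p, ?_⟩
        simp [htw, hp]
      obtain ⟨tw', htw'⟩ := htw_cons
      have hxle : ∀ y ∈ (x :: t), x ≤ y := by
        intro y hy
        rcases List.mem_cons.mp hy with h | h
        · exact le_of_eq h.symm
        · exact (List.pairwise_cons.mp hsort).1 y h
      have hdw_sub : dw.Sublist (x :: t) := List.dropWhile_sublist p
      have hdw_pair : dw.Pairwise (· ≤ ·) := List.Pairwise.sublist hdw_sub hsort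
      have hxdw : x ∉ dw := by
        intro hx
        cases hdwc : dw with
        | nil => simp [hdwc] at hx
        | cons h' t' =>
          have hh : ¬ p h' = true := by
            have := List.head?_dropWhile_not p (x :: t)
            simp [hdwc, ← hdw] at this
            simpa using this
          have hhne : h' ≠ x := by simpa [hp] using hh
          have hh_mem : h' ∈ (x :: t) := hdw_sub.mem (by simp [hdwc])
          have hxh : x < h' := lt_of_le_of_ne (hxle h' hh_mem) (Ne.symm hhne)
          rw [hdwc] at hx
          rcases List.mem_cons.mp hx with h | h
          · exact hhne h.symm
          · have := (List.pairwise_cons.mp (hdwc ▸ hdw_pair)).1 x h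
            omega
      have hlen_dw : dw.length ≤ n := by
        have h1 : tw.length + dw.length = (x :: t).length := by
          rw [← hsplit]; simp
        have h2 : 1 ≤ tw.length := by rw [htw']; simp
        simp only [List.length_cons] at h1 hlen
        omega
      -- run the scan over the decomposition
      have hscan : goodSeqFlush ((x :: t).foldl goodSeqStep (none, 0, 0)) =
          gsF x tw.length + goodSeqFlush (dw.foldl goodSeqStep (none, 0, 0)) := by
        have h2 : 1 ≤ tw.length := by rw [htw']; simp
        have hfold_tw : tw.foldl goodSeqStep (none, 0, 0) =
            (some x, (tw.length : Int), (0 : Int)) := by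
          obtain ⟨m, hm⟩ : ∃ m, tw.length = m + 1 := ⟨tw.length - 1, by omega⟩
          rw [htw_repl, hm, List.replicate_succ]
          simp only [List.foldl_cons, goodSeqStep]
          rw [gs_repl]
          simp only [Prod.mk.injEq, List.length_cons, List.length_replicate]
          push_cast
          exact ⟨trivial, by ring, trivial⟩
        conv_lhs => rw [← hsplit]
        rw [List.foldl_append, hfold_tw, gs_shift dw x (tw.length : Int) 0 hxdw]
        simp [gsF]
      rw [hscan, ih dw hlen_dw hdw_pair]
      -- count bookkeeping
      have hcount_x : ((x :: t).count x : Int) = (tw.length : Int) := by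
        have : (x :: t).count x = tw.count x + dw.count x := by
          rw [← hsplit, List.count_append]
        rw [this, htw_repl, List.count_replicate_self,
          List.count_eq_zero_of_not_mem hxdw]
        simp
      have hcount_other : ∀ v, v ≠ x → (x :: t).count v = dw.count v := by
        intro v hv
        have : (x :: t).count v = tw.count v + dw.count v := by
          rw [← hsplit, List.count_append]
        rw [this, htw_repl, List.count_replicate]
        simp [Ne.symm hv]
      -- the dedup of s is a permutation of x :: dedup dw
      have hxdcw : x ∉ PySem.List.dedup dw := fun h => hxdw ((PySem.List.mem_dedup _ _).mp h)
      have hnod1 : (PySem.List.dedup (x :: t)).Nodup := PySem.List.nodup_dedup _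
      have hnod2 : (x :: PySem.List.dedup dw).Nodup :=
        List.nodup_cons.mpr ⟨hxdcw, PySem.List.nodup_dedup _⟩
      have hmem : ∀ v, v ∈ PySem.List.dedup (x :: t) ↔ v ∈ (x :: PySem.List.dedup dw) := by
        intro v
        simp only [PySem.List.mem_dedup, List.mem_cons]
        constructor
        · intro hv
          rcases hv with h | h
          · exact Or.inl h
          · by_cases hvx : v = x
            · exact Or.inl hvx
            · right
              have hvmem : v ∈ tw ++ dw := by rw [hsplit]; simp [h]
              rcases List.mem_append.mp hvmem with h' | h'
              · exact absurd (htw_all v h') hvx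
              · exact h'
        · intro hv
          rcases hv with h | h
          · exact Or.inl h
          · exact List.mem_cons.mp (hdw_sub.mem h)
      have hperm : (PySem.List.dedup (x :: t)).Perm (x :: PySem.List.dedup dw) :=
        (List.perm_ext_iff_of_nodup hnod1 hnod2).mpr hmem
      -- rewrite the IH's counts to counts in x :: t
      have hmapc : (PySem.List.dedup dw).map (fun v => gsF v (dw.count v)) =
          (PySem.List.dedup dw).map (fun v => gsF v ((x :: t).count v)) := by
        apply List.map_congr_left
        intro v hv
        have hvdw : v ∈ dw := (PySem.List.mem_dedup _ _).mp hv
        have hvx : v ≠ x := fun h => hxdw (h ▸ hvdw)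
        rw [hcount_other v hvx]
      rw [hmapc]
      have := (hperm.map (fun v => gsF v ((x :: t).count v))).sum_eq
      rw [this]
      simp only [List.map_cons, List.sum_cons]
      congr 1
      simp only [gsF]
      rw [hcount_x]

-- A's fold as a sum
theorem gs_A_fold (g : Int → Int) : ∀ (l : List Int) (r : Int),
    l.foldl (fun removals x =>
      if g x < x then removals + g x else removals + (g x - x)) r =
      r + (l.map (fun x => gsF x (g x))).sum := by
  intro l
  induction l with
  | nil => intro r; simp
  | cons x t ih =>
    intro r
    simp only [List.foldl_cons, List.map_cons, List.sum_cons]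
    by_cases h : g x < x
    · have hg : gsF x (g x) = g x := by simp [gsF, h]
      rw [if_pos h, ih, hg]; ring
    · have hg : gsF x (g x) = g x - x := by simp [gsF, h]
      rw [if_neg h, ih, hg]; ring

-- ===== VERDICT (by name: the statement is the Claim_ definition above) =====
theorem goodSeq_spec : Claim_equal_goodSeq := by
  intro N a _
  unfold Spec_goodSeq goodSeq goodSeq_alt
  -- A's side: fold over the counter's keys = sum over dedup a
  have hA : (PySem.Dict.counter a).keys.foldl (fun removals x =>
      let count := (PySem.Dict.counter a).getD x 0
      if count < x then removals + count else removals + (count - x)) 0 =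
      ((PySem.List.dedup a).map (fun x => gsF x (a.count x))).sum := by
    have hkeys : (PySem.Dict.counter a).keys = PySem.List.dedup a := by
      rw [PySem.Dict.keys_counter, PySem.List.dedup_eq_ofList]
    simp only [PySem.Dict.getD_counter, hkeys]
    rw [gs_A_fold (fun x => (a.count x : Int)) (PySem.List.dedup a) 0]
    simp
  -- B's side: run scan over sorted a = sum over dedup (sorted a)
  set s := PySem.List.sorted a (fun x => x) false with hsdef
  have hB : goodSeqFlush (s.foldl goodSeqStep (none, 0, 0)) =
      ((PySem.List.dedup s).map (fun v => gsF v (s.count v))).sum :=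
    gs_main s.length s le_rfl (by simpa using PySem.List.sorted_pairwise a (fun x => x))
  have hperm : s.Perm a := PySem.List.sorted_perm a (fun x => x) false
  have hcnt : ∀ v, s.count v = a.count v := fun v => hperm.count_eq v
  have hdperm : (PySem.List.dedup a).Perm (PySem.List.dedup s) := by
    apply (List.perm_ext_iff_of_nodup (PySem.List.nodup_dedup _) (PySem.List.nodup_dedup _)).mpr
    intro v
    simp only [PySem.List.mem_dedup]
    exact hperm.mem_iff.symm
  rw [hA, hB]
  have hmapc : (PySem.List.dedup s).map (fun v => gsF v (s.count v)) =
      (PySem.List.dedup s).map (fun v => gsF v (a.count v)) := by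
    apply List.map_congr_left
    intro v _
    rw [hcnt v]
  rw [hmapc]
  exact ((hdperm.map (fun v => gsF v (a.count v))).sum_eq)
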